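-- pv_equiv track=rewrite | github.com/magimetal/dw-port-experiment | engine/run_phase2_slice_rng.py | _generate_rng_sequence_fallback
-- ===== SOURCE A (Python) =====
-- def _generate_rng_sequence_fallback(count: int = 20) -> list[int]:
--     rng_lb = 0
--     rng_ub = 0
--     sequence: list[int] = []
--
--     for _ in range(count):
--         original_ub = rng_ub
--         original_lb = rng_lb
--
--         carry = (rng_lb >> 7) & 0x01
--         rng_lb = (rng_lb << 1) & 0xFF
--         rng_ub = ((rng_ub << 1) | carry) & 0xFF
--
--         total = rng_lb + original_lb
--         rng_lb = total & 0xFF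
--         carry = 1 if total > 0xFF else 0
--
--         total = rng_ub + original_ub + carry
--         rng_ub = total & 0xFF
--
--         rng_ub = (rng_lb + rng_ub) & 0xFF
--
--         total = rng_lb + 0x81
--         rng_lb = total & 0xFF
--         carry = 1 if total > 0xFF else 0
--
--         rng_ub = (rng_ub + carry) & 0xFF
--         sequence.append(rng_lb)
--
--     return sequence
-- ===== SOURCE B (Python) =====
-- def _generate_rng_sequence_fallback(count: int = 20) -> list[int]:
--     s = 0
--     out: list[int] = []
--     for _ in range(count):
--         s = (3 * s) & 0xFFFF
--         lb = s & 0xFF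
--         ub = ((s >> 8) + lb) & 0xFF
--         t = lb + 0x81
--         ub = (ub + (t >> 8)) & 0xFF
--         lb = t & 0xFF
--         s = (ub << 8) + lb
--         out.append(lb)
--     return out
-- ===== Notes on version B (the rewrite author's own statement) =====
-- stated objective: simpler
-- what changed: Replaces the two 8-bit registers with one 16-bit state updated as s = 3*s mod 2^16 (A's shift-then-add-original with a hand-threaded carry chain IS multiplication by 3 on the 16-bit pair), keeping only the byte-level mix and +0x81 steps; the body shrinks from a dozen carry manipulations to six lines.
import Mathlib
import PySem

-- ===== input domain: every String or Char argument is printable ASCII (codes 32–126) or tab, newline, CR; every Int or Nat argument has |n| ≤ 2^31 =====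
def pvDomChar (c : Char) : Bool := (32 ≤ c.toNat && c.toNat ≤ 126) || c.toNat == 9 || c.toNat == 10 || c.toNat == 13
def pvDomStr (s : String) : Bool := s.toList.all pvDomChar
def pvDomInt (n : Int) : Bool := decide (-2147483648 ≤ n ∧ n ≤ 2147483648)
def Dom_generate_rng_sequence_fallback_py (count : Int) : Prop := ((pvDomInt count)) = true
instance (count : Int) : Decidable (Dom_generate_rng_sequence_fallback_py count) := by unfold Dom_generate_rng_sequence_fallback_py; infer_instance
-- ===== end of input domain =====

-- B replaces A's two 8-bit registers and hand-threaded carries by one 16-bit state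
-- updated as s = 3*s mod 2^16, for a shorter, plainer loop body (same O(count) cost).


-- ===== PORT A =====
-- one iteration of A's loop body, literally: state (rng_lb, rng_ub, sequence)
def pvStepA (st : Int × Int × List Int) : Int × Int × List Int :=
  let rng_lb := st.1
  let rng_ub := st.2.1
  let sequence := st.2.2
  let original_ub := rng_ub
  let original_lb := rng_lb
  let carry := PySem.Int.band (rng_lb >>> 7) 0x01
  let rng_lb := PySem.Int.band (rng_lb <<< 1) 0xFF
  let rng_ub := PySem.Int.band (PySem.Int.bor (rng_ub <<< 1) carry) 0xFF
  let total := rng_lb + original_lb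
  let rng_lb := PySem.Int.band total 0xFF
  let carry := if total > 0xFF then (1 : Int) else 0
  let total := rng_ub + original_ub + carry
  let rng_ub := PySem.Int.band total 0xFF
  let rng_ub := PySem.Int.band (rng_lb + rng_ub) 0xFF
  let total := rng_lb + 0x81
  let rng_lb := PySem.Int.band total 0xFF
  let carry := if total > 0xFF then (1 : Int) else 0
  let rng_ub := PySem.Int.band (rng_ub + carry) 0xFF
  (rng_lb, rng_ub, sequence ++ [rng_lb])

def generate_rng_sequence_fallback_py (count : Int) : List Int :=
  ((PySem.List.pyRange 0 count 1).foldl (fun st _ => pvStepA st) (0, 0, [])).2.2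

-- ===== PORT B =====
-- one iteration of B's loop body: state (s, out)
def pvStepB (st : Int × List Int) : Int × List Int :=
  let s := PySem.Int.band (3 * st.1) 0xFFFF
  let lb := PySem.Int.band s 0xFF
  let ub := PySem.Int.band ((s >>> 8) + lb) 0xFF
  let t := lb + 0x81
  let ub := PySem.Int.band (ub + (t >>> 8)) 0xFF
  let lb := PySem.Int.band t 0xFF
  ((ub <<< 8) + lb, st.2 ++ [lb])

def generate_rng_sequence_fallback_py_alt (count : Int) : List Int :=
  ((PySem.List.pyRange 0 count 1).foldl (fun st _ => pvStepB st) (0, [])).2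

-- ===== PRECONDITION & SPEC =====
def Spec_generate_rng_sequence_fallback_py (count : Int) (out : List Int) : Prop := out = generate_rng_sequence_fallback_py_alt count
instance (count : Int) (out : List Int) : Decidable (Spec_generate_rng_sequence_fallback_py count out) := by unfold Spec_generate_rng_sequence_fallback_py; infer_instance

-- ===== CLAIM (what is proved, stated in full; the proofs are below) =====
def Claim_equal_generate_rng_sequence_fallback_py : Prop := ∀ (count : Int), Dom_generate_rng_sequence_fallback_py count → Spec_generate_rng_sequence_fallback_py count (generate_rng_sequence_fallback_py count)

-- ===== LEMMAS AND PROOFS =====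

-- bit-op ↔ arithmetic bridges (Int level, nonneg arguments)
lemma pv_shl1 (a : Int) : a <<< (1:Int) = 2 * a := by
  simpa [mul_comm] using Int.shiftLeft_eq_mul_pow a 1
lemma pv_shl8 (a : Int) : a <<< (8:Int) = 256 * a := by
  simpa [mul_comm] using Int.shiftLeft_eq_mul_pow a 8
lemma pv_shr7 (a : Int) (h : 0 ≤ a) : a >>> (7:Int) = a / 128 := by
  lift a to ℕ using h with n
  rw [show (7:Int) = ((7:ℕ):Int) from rfl, Int.shiftRight_natCast, Nat.shiftRight_eq_div_pow]
  push_cast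
  omega
lemma pv_shr8 (a : Int) (h : 0 ≤ a) : a >>> (8:Int) = a / 256 := by
  lift a to ℕ using h with n
  rw [show (8:Int) = ((8:ℕ):Int) from rfl, Int.shiftRight_natCast, Nat.shiftRight_eq_div_pow]
  push_cast
  omega
lemma pv_band255 (a : Int) (h : 0 ≤ a) : PySem.Int.band a 255 = a % 256 := by
  rw [PySem.Int.band_of_nonneg h (by norm_num)]
  rw [show (255:Int).toNat = 255 from rfl, Nat.and_two_pow_sub_one_eq_mod a.toNat 8]
  omega
lemma pv_band65535 (a : Int) (h : 0 ≤ a) : PySem.Int.band a 65535 = a % 65536 := by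
  rw [PySem.Int.band_of_nonneg h (by norm_num)]
  rw [show (65535:Int).toNat = 65535 from rfl, Nat.and_two_pow_sub_one_eq_mod a.toNat 16]
  omega
lemma pv_band1 (a : Int) : PySem.Int.band a 1 = a % 2 := by
  rw [PySem.Int.band_one, PySem.Int.mod_eq_emod_of_pos (by norm_num)]
lemma pv_or2i (a c : Int) (ha : 0 ≤ a) (h0 : 0 ≤ c) (h2 : c < 2) :
    PySem.Int.bor (2 * a) c = 2 * a + c := by
  rw [PySem.Int.bor_of_nonneg (by omega) h0]
  have h2a : (2 * a).toNat = 2 * a.toNat := by omega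
  have key : 2 * a.toNat ||| c.toNat = 2 * a.toNat + c.toNat := by
    have hc : c.toNat < 2 := by omega
    interval_cases c.toNat
    · simp
    · simpa [Nat.bit, Nat.mul_comm] using Nat.lor_bit false a.toNat true 0
  rw [h2a, key]
  omega


-- the 16-bit carry of tripling a byte, split along A's first-add carry test
lemma pv_q3_pos (lb : Int) (h0 : 0 ≤ lb) (h1 : lb < 256) (hc : 2 * lb % 256 + lb > 255) :
    3 * lb / 256 = lb / 128 + 1 := by interval_cases lb <;> omega
lemma pv_q3_neg (lb : Int) (h0 : 0 ≤ lb) (h1 : lb < 256) (hc : ¬(2 * lb % 256 + lb > 255)) :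
    3 * lb / 256 = lb / 128 := by interval_cases lb <;> omega

-- A's step and B's step agree through the invariant s = 256*ub + lb
set_option maxHeartbeats 1000000 in
lemma pv_step_rel (lb ub : Int) (seq seq' : List Int)
    (h0 : 0 ≤ lb) (h1 : lb < 256) (h2 : 0 ≤ ub) (h3 : ub < 256) :
    pvStepB (256 * ub + lb, seq') =
      (256 * (pvStepA (lb, ub, seq)).2.1 + (pvStepA (lb, ub, seq)).1,
       seq' ++ [(pvStepA (lb, ub, seq)).1]) ∧
    (pvStepA (lb, ub, seq)).2.2 = seq ++ [(pvStepA (lb, ub, seq)).1] ∧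
    0 ≤ (pvStepA (lb, ub, seq)).1 ∧ (pvStepA (lb, ub, seq)).1 < 256 ∧
    0 ≤ (pvStepA (lb, ub, seq)).2.1 ∧ (pvStepA (lb, ub, seq)).2.1 < 256 := by
  simp only [pvStepA, pvStepB]
  rw [pv_shr7 lb h0, pv_band1 _, pv_shl1 lb, pv_shl1 ub,
    pv_band255 (2*lb) (by omega), pv_or2i ub _ h2 (by omega) (by omega)]
  simp only [Prod.mk.injEq, List.append_right_inj, List.cons.injEq, and_true, true_and]
  -- B side: bands and shifts to % and /
  rw [pv_band65535 (3 * (256 * ub + lb)) (by omega)]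
  set s3 : Int := 3 * (256 * ub + lb) % 65536 with hs3
  have hs3b : 0 ≤ s3 ∧ s3 < 65536 := by rw [hs3]; omega
  rw [pv_shr8 s3 (by omega), pv_band255 s3 (by omega)]
  set bl : Int := s3 % 256 with hbl
  have hblb : 0 ≤ bl ∧ bl < 256 := by rw [hbl]; omega
  rw [pv_band255 (s3 / 256 + bl) (by omega), pv_shr8 (bl + 129) (by omega),
    pv_band255 ((s3 / 256 + bl) % 256 + (bl + 129) / 256) (by omega),
    pv_band255 (bl + 129) (by omega), pv_shl8]
  -- A side: the if-free bands
  rw [pv_band255 (2 * lb % 256 + lb) (by omega)]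
  set a1 : Int := (2 * lb % 256 + lb) % 256 with ha1
  have ha1b : 0 ≤ a1 ∧ a1 < 256 := by rw [ha1]; omega
  rw [pv_band255 (2 * ub + lb / 128 % 2) (by omega)]
  set a2 : Int := (2 * ub + lb / 128 % 2) % 256 with ha2
  have ha2b : 0 ≤ a2 ∧ a2 < 256 := by rw [ha2]; omega
  rw [pv_band255 (a1 + 129) (by omega)]
  split_ifs with hi1 hi2 hi2
  all_goals first
    | rw [pv_band255 (a2 + ub + 1) (by omega)]
    | rw [pv_band255 (a2 + ub + 0) (by omega)]
  all_goals first
    | rw [pv_band255 (a1 + (a2 + ub + 1) % 256) (by omega)]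
    | rw [pv_band255 (a1 + (a2 + ub + 0) % 256) (by omega)]
  all_goals first
    | rw [pv_band255 ((a1 + (a2 + ub + 1) % 256) % 256 + 1) (by omega)]
    | rw [pv_band255 ((a1 + (a2 + ub + 1) % 256) % 256 + 0) (by omega)]
    | rw [pv_band255 ((a1 + (a2 + ub + 0) % 256) % 256 + 1) (by omega)]
    | rw [pv_band255 ((a1 + (a2 + ub + 0) % 256) % 256 + 0) (by omega)]
  all_goals (
    have hbit : lb / 128 % 2 = lb / 128 := by omega
    have hdec : s3 = (3 * ub + 3 * lb / 256) % 256 * 256 + 3 * lb % 256 := by omega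
    have hH : s3 / 256 = (3 * ub + 3 * lb / 256) % 256 := by omega
    have e1 : bl = a1 := by omega)
  all_goals first
    | (have hq := pv_q3_pos lb h0 h1 hi1
       have e2 : s3 / 256 = (a2 + ub + 1) % 256 := by
         rw [ha2, hbit, hH, hq]
         conv_rhs => rw [add_assoc, Int.emod_add_emod]
         ring_nf)
    | (have hq := pv_q3_neg lb h0 h1 hi1
       have e2 : s3 / 256 = (a2 + ub + 0) % 256 := by
         rw [ha2, hbit, hH, hq]
         conv_rhs => rw [add_assoc, Int.emod_add_emod]
         ring_nf)
  all_goals rw [e1, e2]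
  all_goals first
    | rw [show (a1 + 129) / 256 = 1 from by omega]
    | rw [show (a1 + 129) / 256 = 0 from by omega]
  all_goals refine ⟨⟨?_, ?_⟩, ?_, ?_, ?_, ?_⟩
  all_goals (ring_nf <;> omega)

-- the folds stay in lockstep over any driving list
lemma pv_fold_rel (l : List Int) (lb ub : Int) (seq : List Int)
    (h0 : 0 ≤ lb) (h1 : lb < 256) (h2 : 0 ≤ ub) (h3 : ub < 256) :
    (l.foldl (fun st _ => pvStepB st) (256 * ub + lb, seq)).2 =
      (l.foldl (fun st _ => pvStepA st) (lb, ub, seq)).2.2 := by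
  induction l generalizing lb ub seq with
  | nil => rfl
  | cons x xs ih =>
    obtain ⟨hB, hseq, b0, b1, b2, b3⟩ := pv_step_rel lb ub seq seq h0 h1 h2 h3
    simp only [List.foldl_cons, hB]
    have hA : pvStepA (lb, ub, seq) =
        ((pvStepA (lb, ub, seq)).1, (pvStepA (lb, ub, seq)).2.1, seq ++ [(pvStepA (lb, ub, seq)).1]) := by
      rw [← hseq]
    rw [hA, ih _ _ _ b0 b1 b2 b3]

-- ===== VERDICT (by name: the statement is the Claim_ definition above) =====
theorem generate_rng_sequence_fallback_py_spec : Claim_equal_generate_rng_sequence_fallback_py := by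
  intro count _
  unfold Spec_generate_rng_sequence_fallback_py
  unfold generate_rng_sequence_fallback_py generate_rng_sequence_fallback_py_alt
  have := pv_fold_rel (PySem.List.pyRange 0 count 1) 0 0 [] (by norm_num) (by norm_num) (by norm_num) (by norm_num)
  simpa using this.symm
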